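-- pv_equiv track=rewrite | github.com/Mahan-AK/Primitive_Neural_Networks | 1.Hebb/hebb.py | train_hebb
-- ===== SOURCE A (Python) =====
-- def train_hebb(x_train, y_train):
--     input_layer_num = len(x_train[0])
--     output_layer_num = len(y_train[0])
--     train_samples = len(x_train)
--
--     weights = [[0 for _ in range(output_layer_num)] for _ in range(input_layer_num)]
--     biases = [0 for _ in range(output_layer_num)]
--
--     for i in range(train_samples):
--         for k in range(output_layer_num):
--             for j in range(input_layer_num):
--                 weights[j][k] += x_train[i][j] * y_train[i][k]
--             biases[k] += y_train[i][k]
--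
--     return weights, biases
-- ===== SOURCE B (Python) =====
-- def train_hebb(x_train, y_train):
--     inN = len(x_train[0])
--     outN = len(y_train[0])
--
--     def solve(lo, hi):
--         # weights and biases contributed by samples lo..hi-1 (hi - lo >= 1)
--         if hi - lo == 1:
--             w = [[x_train[lo][j] * y_train[lo][k] for k in range(outN)]
--                  for j in range(inN)]
--             b = [y_train[lo][k] for k in range(outN)]
--             return w, b
--         mid = (lo + hi) // 2
--         w1, b1 = solve(lo, mid)
--         w2, b2 = solve(mid, hi)
--         w = [[w1[j][k] + w2[j][k] for k in range(outN)] for j in range(inN)]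
--         b = [b1[k] + b2[k] for k in range(outN)]
--         return w, b
--
--     return solve(0, len(x_train))
-- ===== Notes on version B (the rewrite author's own statement) =====
-- stated objective: alternative
-- what changed: B computes the Hebbian tables by divide-and-conquer recursion over the sample range: each half is solved independently into fresh weight/bias matrices that are merged by elementwise addition, instead of A's single in-place triple-loop accumulation over running totals.
import Mathlib
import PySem

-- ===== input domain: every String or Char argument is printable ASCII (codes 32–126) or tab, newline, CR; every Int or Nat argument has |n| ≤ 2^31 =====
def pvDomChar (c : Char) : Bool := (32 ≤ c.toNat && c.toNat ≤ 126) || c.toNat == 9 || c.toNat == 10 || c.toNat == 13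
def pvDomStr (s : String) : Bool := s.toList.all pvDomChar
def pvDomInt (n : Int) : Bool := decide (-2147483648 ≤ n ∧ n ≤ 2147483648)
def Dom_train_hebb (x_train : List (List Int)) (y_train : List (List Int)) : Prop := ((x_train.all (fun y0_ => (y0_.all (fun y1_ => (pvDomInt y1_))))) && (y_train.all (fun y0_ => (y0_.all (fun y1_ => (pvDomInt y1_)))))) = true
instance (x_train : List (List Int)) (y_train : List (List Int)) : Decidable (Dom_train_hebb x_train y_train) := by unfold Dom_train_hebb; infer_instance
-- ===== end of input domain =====

-- B solves the sample range by divide-and-conquer, merging the two halves' weight/bias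
-- matrices by elementwise addition, instead of A's in-place triple-loop accumulation;
-- alternative decomposition, same asymptotic cost.

-- ===== PORT A =====
def train_hebb (x_train : List (List Int)) (y_train : List (List Int)) : List (List Int) × List Int :=
  let inN := (x_train.headD []).length
  let outN := (y_train.headD []).length
  let n := x_train.length
  let w0 := (List.range inN).map (fun _ => (List.range outN).map (fun _ => (0 : Int)))
  let b0 := (List.range outN).map (fun _ => (0 : Int))
  (List.range n).foldl (fun st i =>
    (List.range outN).foldl (fun st k =>
      ((List.range inN).foldl (fun w j =>
          w.set j ((w.getD j []).set k ((w.getD j []).getD k 0 +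
            (x_train.getD i []).getD j 0 * (y_train.getD i []).getD k 0))) st.1,
       st.2.set k (st.2.getD k 0 + (y_train.getD i []).getD k 0))) st) (w0, b0)

-- ===== PORT B =====
-- solve lo hi: divide-and-conquer over samples lo..hi-1 (Python's inner `solve`);
-- the fuel argument (≥ hi - lo at every Python call) only makes the recursion
-- structural/total: Python never exhausts it.
def solveB (x y : List (List Int)) (inN outN : Nat) : Nat → Nat → Nat → List (List Int) × List Int
  | 0, _, _ =>
    ((List.range inN).map (fun _ => (List.range outN).map (fun _ => (0 : Int))),
     (List.range outN).map (fun _ => (0 : Int)))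
  | fuel + 1, lo, hi =>
    if hi - lo = 1 then
      ((List.range inN).map (fun j => (List.range outN).map (fun k =>
          (x.getD lo []).getD j 0 * (y.getD lo []).getD k 0)),
       (List.range outN).map (fun k => (y.getD lo []).getD k 0))
    else
      let mid := (lo + hi) / 2
      let p1 := solveB x y inN outN fuel lo mid
      let p2 := solveB x y inN outN fuel mid hi
      ((List.range inN).map (fun j => (List.range outN).map (fun k =>
          (p1.1.getD j []).getD k 0 + (p2.1.getD j []).getD k 0)),
       (List.range outN).map (fun k => p1.2.getD k 0 + p2.2.getD k 0))

def train_hebb_alt (x_train : List (List Int)) (y_train : List (List Int)) : List (List Int) × List Int :=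
  let inN := (x_train.headD []).length
  let outN := (y_train.headD []).length
  solveB x_train y_train inN outN x_train.length 0 x_train.length

-- ===== PRECONDITION & SPEC =====
-- Pre_ excludes exactly the inputs on which the Python A raises IndexError: empty
-- x_train or y_train, and (when the first y_train row is nonempty, so the indexing is
-- actually reached) an x_train row shorter than the first one, y_train shorter than
-- x_train, or a used y_train row shorter than the first one.
def Pre_train_hebb (x_train : List (List Int)) (y_train : List (List Int)) : Prop :=
  x_train ≠ [] ∧ y_train ≠ [] ∧
  ((y_train.headD []).length = 0 ∨
    ((∀ r ∈ x_train, (x_train.headD []).length ≤ r.length) ∧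
     x_train.length ≤ y_train.length ∧
     ∀ r ∈ y_train.take x_train.length, (y_train.headD []).length ≤ r.length))
instance (x_train : List (List Int)) (y_train : List (List Int)) : Decidable (Pre_train_hebb x_train y_train) := by unfold Pre_train_hebb; infer_instance

def pvWitness_train_hebb : List (List Int) × List (List Int) := ([[1, -1], [1, 1]], [[1], [-1]])

def Spec_train_hebb (x_train : List (List Int)) (y_train : List (List Int)) (out : List (List Int) × List Int) : Prop := out = train_hebb_alt x_train y_train
instance (x_train : List (List Int)) (y_train : List (List Int)) (out : List (List Int) × List Int) : Decidable (Spec_train_hebb x_train y_train out) := by unfold Spec_train_hebb; infer_instance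

-- ===== CLAIM (what is proved, stated in full; the proofs are below) =====
def Claim_equal_train_hebb : Prop := ∀ (x_train : List (List Int)) (y_train : List (List Int)), Dom_train_hebb x_train y_train → Pre_train_hebb x_train y_train → Spec_train_hebb x_train y_train (train_hebb x_train y_train)

-- ===== LEMMAS AND PROOFS =====

-- value of x[i][j] as used by both ports
def xv (x : List (List Int)) (i j : Nat) : Int := (x.getD i []).getD j 0

-- closed interval-sum forms
def S (x y : List (List Int)) (j k lo hi : Nat) : Int :=
  ((List.range' lo (hi - lo)).map (fun i => xv x i j * xv y i k)).sum
def T (y : List (List Int)) (k lo hi : Nat) : Int :=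
  ((List.range' lo (hi - lo)).map (fun i => xv y i k)).sum

def cell (x y : List (List Int)) (j k n : Nat) : Int :=
  (List.range n).foldl (fun s i => s + xv x i j * xv y i k) 0

def bsum (y : List (List Int)) (k n : Nat) : Int :=
  (List.range n).foldl (fun s i => s + xv y i k) 0

lemma getD_map_range' {α : Type} (f : Nat → α) {t m : Nat} (h : t < m) (d : α) :
    ((List.range m).map f).getD t d = f t := by
  rw [List.getD_eq_getElem _ _ (by simpa using h)]
  simp

lemma set_map_range {α : Type} (f : Nat → α) {t m : Nat} (_ : t < m) (v : α) :
    ((List.range m).map f).set t v = (List.range m).map (fun j => if j = t then v else f j) := by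
  apply List.ext_getElem
  · simp
  · intro i h1 h2
    simp only [List.getElem_set, List.getElem_map, List.getElem_range]
    by_cases h3 : i = t
    · rw [if_pos h3.symm, if_pos h3]
    · rw [if_neg (fun hh => h3 hh.symm), if_neg h3]

lemma map_range_congr {α : Type} {m : Nat} {f g : Nat → α} (h : ∀ j < m, f j = g j) :
    (List.range m).map f = (List.range m).map g :=
  List.map_congr_left (by simpa using h)

lemma foldl_set_gen (k : Nat) (d : Nat → Int) (f : Nat → List Int) (M : Nat) :
    ∀ m, m ≤ M →
      (List.range m).foldl (fun w j =>
          w.set j ((w.getD j []).set k ((w.getD j []).getD k 0 + d j))) ((List.range M).map f)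
        = (List.range M).map (fun j => if j < m then (f j).set k ((f j).getD k 0 + d j) else f j) := by
  intro m
  induction m with
  | zero => intro _; simp
  | succ m ih =>
    intro hm
    rw [List.range_succ, List.foldl_append]
    rw [ih (by omega)]
    simp only [List.foldl_cons, List.foldl_nil]
    rw [getD_map_range' _ (by omega), set_map_range _ (by omega)]
    simp only [Nat.lt_irrefl, if_false]
    apply map_range_congr
    intro j hj
    by_cases h1 : j = m
    · subst h1; rw [if_pos rfl, if_pos (by omega)]
    · by_cases h2 : j < m
      · rw [if_neg h1, if_pos h2, if_pos (by omega)]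
      · rw [if_neg h1, if_neg h2, if_neg (by omega)]

lemma kfold_step (inN outN : Nat) (a b : Nat → Int) (W : Nat → Nat → Int) (Bv : Nat → Int) :
    ∀ K, K ≤ outN →
      (List.range K).foldl (fun st k =>
          ((List.range inN).foldl (fun w j =>
              w.set j ((w.getD j []).set k ((w.getD j []).getD k 0 + a j * b k))) st.1,
           st.2.set k (st.2.getD k 0 + b k)))
        ((List.range inN).map (fun j => (List.range outN).map (fun k => W j k)),
         (List.range outN).map Bv)
      = ((List.range inN).map (fun j => (List.range outN).map (fun k =>
            if k < K then W j k + a j * b k else W j k)),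
         (List.range outN).map (fun k => if k < K then Bv k + b k else Bv k)) := by
  intro K
  induction K with
  | zero => intro _; simp
  | succ K ih =>
    intro hK
    rw [List.range_succ, List.foldl_append]
    rw [ih (by omega)]
    simp only [List.foldl_cons, List.foldl_nil, Prod.mk.injEq]
    refine ⟨?_, ?_⟩
    case _ =>
      rw [foldl_set_gen K (fun j => a j * b K)
            (fun j => (List.range outN).map (fun k => if k < K then W j k + a j * b k else W j k))
            inN inN (le_refl _)]
      apply map_range_congr
      intro j hj
      simp only [hj, if_true]
      rw [getD_map_range' _ (by omega), set_map_range _ (by omega)]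
      simp only [Nat.lt_irrefl, if_false]
      apply map_range_congr
      intro k hk
      by_cases h1 : k = K
      · subst h1; rw [if_pos rfl, if_pos (by omega)]
      · by_cases h2 : k < K
        · rw [if_neg h1, if_pos h2, if_pos (by omega)]
        · rw [if_neg h1, if_neg h2, if_neg (by omega)]
    case _ =>
      rw [getD_map_range' _ (by omega), set_map_range _ (by omega)]
      simp only [Nat.lt_irrefl, if_false]
      apply map_range_congr
      intro k hk
      by_cases h1 : k = K
      · subst h1; rw [if_pos rfl, if_pos (by omega)]
      · by_cases h2 : k < K
        · rw [if_neg h1, if_pos h2, if_pos (by omega)]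
        · rw [if_neg h1, if_neg h2, if_neg (by omega)]

lemma ifold (x y : List (List Int)) (inN outN : Nat) :
    ∀ n,
      (List.range n).foldl (fun st i =>
        (List.range outN).foldl (fun st k =>
          ((List.range inN).foldl (fun w j =>
              w.set j ((w.getD j []).set k ((w.getD j []).getD k 0 +
                (x.getD i []).getD j 0 * (y.getD i []).getD k 0))) st.1,
           st.2.set k (st.2.getD k 0 + (y.getD i []).getD k 0))) st)
        ((List.range inN).map (fun _ => (List.range outN).map (fun _ => (0 : Int))),
         (List.range outN).map (fun _ => (0 : Int)))
      = ((List.range inN).map (fun j => (List.range outN).map (fun k => cell x y j k n)),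
         (List.range outN).map (fun k => bsum y k n)) := by
  intro n
  induction n with
  | zero => simp [cell, bsum]
  | succ n ih =>
    rw [List.range_succ, List.foldl_append]
    rw [ih]
    simp only [List.foldl_cons, List.foldl_nil]
    rw [kfold_step inN outN (fun j => (x.getD n []).getD j 0) (fun k => (y.getD n []).getD k 0)
          (fun j k => cell x y j k n) (fun k => bsum y k n) outN (le_refl _)]
    simp only [Prod.mk.injEq]
    refine ⟨?_, ?_⟩
    case _ =>
      apply map_range_congr; intro j hj
      apply map_range_congr; intro k hk
      simp only [hk, if_true, cell, xv, List.range_succ, List.foldl_append,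
        List.foldl_cons, List.foldl_nil]
    case _ =>
      apply map_range_congr; intro k hk
      simp only [hk, if_true, bsum, xv, List.range_succ, List.foldl_append,
        List.foldl_cons, List.foldl_nil]

lemma foldl_add_eq_sum (f : Nat → Int) (l : List Nat) :
    ∀ a : Int, l.foldl (fun s i => s + f i) a = a + (l.map f).sum := by
  induction l with
  | nil => intro a; simp
  | cons i t ih => intro a; simp [ih]; ring

lemma cell_eq_S (x y : List (List Int)) (j k n : Nat) : cell x y j k n = S x y j k 0 n := by
  simp only [cell, S, Nat.sub_zero, ← List.range_eq_range']
  rw [foldl_add_eq_sum]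
  simp

lemma bsum_eq_T (y : List (List Int)) (k n : Nat) : bsum y k n = T y k 0 n := by
  simp only [bsum, T, Nat.sub_zero, ← List.range_eq_range']
  rw [foldl_add_eq_sum]
  simp

lemma range'_split (lo mid hi : Nat) (h1 : lo ≤ mid) (h2 : mid ≤ hi) :
    List.range' lo (hi - lo) = List.range' lo (mid - lo) ++ List.range' mid (hi - mid) := by
  have h := @List.range'_append lo (mid - lo) (hi - mid) 1
  rw [show lo + 1 * (mid - lo) = mid from by omega] at h
  rw [show hi - lo = (mid - lo) + (hi - mid) from by omega, ← h]

lemma S_split (x y : List (List Int)) (j k lo mid hi : Nat)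
    (h1 : lo ≤ mid) (h2 : mid ≤ hi) :
    S x y j k lo hi = S x y j k lo mid + S x y j k mid hi := by
  simp only [S]
  rw [← List.sum_append, ← List.map_append, range'_split lo mid hi h1 h2]

lemma T_split (y : List (List Int)) (k lo mid hi : Nat)
    (h1 : lo ≤ mid) (h2 : mid ≤ hi) :
    T y k lo hi = T y k lo mid + T y k mid hi := by
  simp only [T]
  rw [← List.sum_append, ← List.map_append, range'_split lo mid hi h1 h2]

lemma solveB_eq (x y : List (List Int)) (inN outN : Nat) :
    ∀ fuel lo hi, lo < hi → hi - lo ≤ fuel →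
      solveB x y inN outN fuel lo hi
        = ((List.range inN).map (fun j => (List.range outN).map (fun k => S x y j k lo hi)),
           (List.range outN).map (fun k => T y k lo hi)) := by
  intro fuel
  induction fuel with
  | zero => intro lo hi hlt hle; omega
  | succ fuel ih =>
    intro lo hi hlt hle
    rw [solveB]
    by_cases h1 : hi - lo = 1
    · rw [if_pos h1]
      simp only [Prod.mk.injEq]
      constructor
      · apply map_range_congr; intro j hj
        apply map_range_congr; intro k hk
        simp [S, h1, xv]
      · apply map_range_congr; intro k hk
        simp [T, h1, xv]
    · rw [if_neg h1]
      dsimp only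
      have hmidlo : lo < (lo + hi) / 2 := by omega
      have hmidhi : (lo + hi) / 2 < hi := by omega
      rw [ih lo ((lo + hi) / 2) hmidlo (by omega),
          ih ((lo + hi) / 2) hi hmidhi (by omega)]
      simp only [Prod.mk.injEq]
      constructor
      · apply map_range_congr; intro j hj
        rw [getD_map_range' _ hj, getD_map_range' _ hj]
        apply map_range_congr; intro k hk
        rw [getD_map_range' _ hk, getD_map_range' _ hk]
        exact (S_split x y j k lo ((lo + hi) / 2) hi (by omega) (by omega)).symm
      · apply map_range_congr; intro k hk
        rw [getD_map_range' _ hk, getD_map_range' _ hk]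
        exact (T_split y k lo ((lo + hi) / 2) hi (by omega) (by omega)).symm

-- ===== VERDICT (by name: the statement is the Claim_ definition above) =====
theorem train_hebb_spec : Claim_equal_train_hebb := by
  intro x y _ hp
  unfold Spec_train_hebb
  have hx : x ≠ [] := hp.1
  have hn : 0 < x.length := List.length_pos_iff.mpr hx
  simp only [train_hebb, train_hebb_alt]
  rw [ifold x y (x.headD []).length (y.headD []).length x.length,
      solveB_eq x y (x.headD []).length (y.headD []).length x.length 0 x.length hn (by omega)]
  simp only [Prod.mk.injEq]
  constructor
  · apply map_range_congr; intro j hj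
    apply map_range_congr; intro k hk
    exact cell_eq_S x y j k x.length
  · apply map_range_congr; intro k hk
    exact bsum_eq_T y k x.length
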